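-- pv_equiv track=rewrite | github.com/Lullapalanza/kle | kle/designs/USC00.py | get_resonator_path
-- ===== SOURCE A (Python) =====
-- def get_resonator_path(w, N, gap, arm_len, end_len=15):
--     path = [(-3-gap-w, end_len-3), (-gap -w, end_len-3), (-gap -w, 0), (0, 0), (arm_len, 0)]
--     lp = path[-1]
--     for i in range(N-1):
--         dir = -1 if i%2 == 0 else 1
--         path += [(lp[0], lp[1] + gap + w), (lp[0] + dir * arm_len, lp[1] + gap + w)]
--         lp = path[-1]
--
--     path += [(-gap -w, lp[1]), (-gap -w, lp[1]-end_len+3), (-gap-w-3, lp[1]-end_len+3)]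
--
--     return path, path[0], path[-1]
-- ===== SOURCE B (Python) =====
-- def get_resonator_path(w, N, gap, arm_len, end_len=15):
--     p = gap + w
--     mid = [pt
--            for i in range(N - 1)
--            for pt in (((arm_len, (i + 1) * p), (0, (i + 1) * p)) if i % 2 == 0
--                       else ((0, (i + 1) * p), (arm_len, (i + 1) * p)))]
--     last_y = max(N - 1, 0) * p
--     path = ([(-3 - p, end_len - 3), (-p, end_len - 3), (-p, 0), (0, 0), (arm_len, 0)]
--             + mid
--             + [(-p, last_y), (-p, last_y - end_len + 3), (-p - 3, last_y - end_len + 3)])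
--     return path, (-3 - p, end_len - 3), (-p - 3, last_y - end_len + 3)
-- ===== Notes on version B (the rewrite author's own statement) =====
-- stated objective: simpler
-- what changed: Drops the running last-point accumulator and the read of path[-1]: the middle points are produced directly from the index i (y=(i+1)*(gap+w), x-pair chosen by the parity of i) via a comprehension, and the terminal y is the closed form max(N-1,0)*(gap+w), so the path is assembled in one list expression and the first/last return values are written as literals.
import Mathlib
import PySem

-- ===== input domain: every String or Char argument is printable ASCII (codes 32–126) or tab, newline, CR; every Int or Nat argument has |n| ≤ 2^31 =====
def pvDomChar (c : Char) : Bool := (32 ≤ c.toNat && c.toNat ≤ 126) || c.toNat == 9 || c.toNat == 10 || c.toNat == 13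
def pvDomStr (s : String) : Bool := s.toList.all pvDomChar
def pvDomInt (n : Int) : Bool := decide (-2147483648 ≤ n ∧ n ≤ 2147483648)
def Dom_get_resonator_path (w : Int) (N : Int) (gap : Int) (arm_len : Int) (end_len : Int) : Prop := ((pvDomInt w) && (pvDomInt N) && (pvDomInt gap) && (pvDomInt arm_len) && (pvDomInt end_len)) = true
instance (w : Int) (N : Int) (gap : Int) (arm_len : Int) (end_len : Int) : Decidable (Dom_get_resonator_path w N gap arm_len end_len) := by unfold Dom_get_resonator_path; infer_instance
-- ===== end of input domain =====

-- B builds the middle points directly from the index (parity of i) instead of A's running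
-- last-point accumulator; objective: simpler (one list expression, no accumulator).

-- ===== PORT A =====
-- literal port of A; 'path[-1]' is read with pyGetD: path is nonempty at every read, so the
-- default (0,0) is never returned and pyGetD equals Python's path[-1] exactly.
def get_resonator_path (w : Int) (N : Int) (gap : Int) (arm_len : Int) (end_len : Int) :
    (List (Int × Int)) × (Int × Int) × (Int × Int) :=
  let path : List (Int × Int) :=
    [(-3 - gap - w, end_len - 3), (-gap - w, end_len - 3), (-gap - w, 0), (0, 0), (arm_len, 0)]
  let lp : Int × Int := PySem.List.pyGetD path (-1) (0, 0)
  let st := (PySem.List.pyRange 0 (N - 1) 1).foldl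
    (fun (st : List (Int × Int) × (Int × Int)) i =>
      let dir : Int := if PySem.Int.mod i 2 == 0 then -1 else 1
      let path := st.1 ++ [(st.2.1, st.2.2 + gap + w), (st.2.1 + dir * arm_len, st.2.2 + gap + w)]
      (path, PySem.List.pyGetD path (-1) (0, 0)))
    (path, lp)
  let path := st.1 ++ [(-gap - w, st.2.2), (-gap - w, st.2.2 - end_len + 3), (-gap - w - 3, st.2.2 - end_len + 3)]
  (path, PySem.List.pyGetD path 0 (0, 0), PySem.List.pyGetD path (-1) (0, 0))

-- ===== PORT B =====
def get_resonator_path_alt (w : Int) (N : Int) (gap : Int) (arm_len : Int) (end_len : Int) :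
    (List (Int × Int)) × (Int × Int) × (Int × Int) :=
  let p := gap + w
  let mid : List (Int × Int) := (List.range (N - 1).toNat).flatMap (fun i =>
    if i % 2 == 0 then [((arm_len : Int), ((i : Int) + 1) * p), (0, ((i : Int) + 1) * p)]
    else [((0 : Int), ((i : Int) + 1) * p), (arm_len, ((i : Int) + 1) * p)])
  let last_y := max (N - 1) 0 * p
  let path := [(-3 - p, end_len - 3), (-p, end_len - 3), (-p, 0), (0, 0), (arm_len, 0)] ++ mid
      ++ [(-p, last_y), (-p, last_y - end_len + 3), (-p - 3, last_y - end_len + 3)]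
  (path, (-3 - p, end_len - 3), (-p - 3, last_y - end_len + 3))

-- ===== PRECONDITION & SPEC =====
def Spec_get_resonator_path (w : Int) (N : Int) (gap : Int) (arm_len : Int) (end_len : Int) (out : (List (Int × Int)) × (Int × Int) × (Int × Int)) : Prop := out = get_resonator_path_alt w N gap arm_len end_len
instance (w : Int) (N : Int) (gap : Int) (arm_len : Int) (end_len : Int) (out : (List (Int × Int)) × (Int × Int) × (Int × Int)) : Decidable (Spec_get_resonator_path w N gap arm_len end_len out) := by unfold Spec_get_resonator_path; infer_instance

-- ===== CLAIM (what is proved, stated in full; the proofs are below) =====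
def Claim_equal_get_resonator_path : Prop := ∀ (w : Int) (N : Int) (gap : Int) (arm_len : Int) (end_len : Int), Dom_get_resonator_path w N gap arm_len end_len → Spec_get_resonator_path w N gap arm_len end_len (get_resonator_path w N gap arm_len end_len)

-- ===== LEMMAS AND PROOFS =====

-- middle section of B, as a function of the loop count k
def pvMid (gap w arm_len : Int) (k : Nat) : List (Int × Int) :=
  (List.range k).flatMap (fun i =>
    if i % 2 == 0 then [((arm_len : Int), ((i : Int) + 1) * (gap + w)), (0, ((i : Int) + 1) * (gap + w))]
    else [((0 : Int), ((i : Int) + 1) * (gap + w)), (arm_len, ((i : Int) + 1) * (gap + w))])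

-- closed form of A's accumulator lp after k loop iterations
def pvLp (gap w arm_len : Int) (k : Nat) : Int × Int :=
  (if k % 2 == 0 then arm_len else 0, (k : Int) * (gap + w))

theorem pvLast (xs : List (Int × Int)) (a b : Int × Int) :
    PySem.List.pyGetD (xs ++ [a, b]) (-1) (0, 0) = b := by
  have h : xs ++ [a, b] = (xs ++ [a]) ++ [b] := by simp
  rw [h, PySem.List.pyGetD_neg_one_append_singleton]

theorem pvLoop_inv (w gap arm_len : Int) (p0 : List (Int × Int)) (k : Nat) :
    (PySem.List.pyRange 0 (k : Int) 1).foldl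
      (fun (st : List (Int × Int) × (Int × Int)) i =>
        let dir : Int := if PySem.Int.mod i 2 == 0 then -1 else 1
        let path := st.1 ++ [(st.2.1, st.2.2 + gap + w), (st.2.1 + dir * arm_len, st.2.2 + gap + w)]
        (path, PySem.List.pyGetD path (-1) (0, 0)))
      (p0 ++ [(arm_len, 0)], (arm_len, 0))
    = (p0 ++ [(arm_len, 0)] ++ pvMid gap w arm_len k, pvLp gap w arm_len k) := by
  induction k with
  | zero => simp [pvMid, pvLp]
  | succ k ih =>
    have hsplit : PySem.List.pyRange 0 ((k : Int) + 1) 1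
        = PySem.List.pyRange 0 (k : Int) 1 ++ [(k : Int)] :=
      PySem.List.pyRange_one_succ_right (by exact_mod_cast Nat.zero_le k)
    have hmod : PySem.Int.mod (k : Int) 2 = ((k % 2 : Nat) : Int) := by
      simp
    push_cast
    rw [hsplit, List.foldl_append, ih]
    simp only [List.foldl_cons, List.foldl_nil, pvLp]
    rw [pvLast]
    rcases Nat.even_or_odd k with he | ho
    · have h2 : k % 2 = 0 := Nat.even_iff.mp he
      have h2' : (k + 1) % 2 = 1 := by omega
      have hk2 : (k : Int) % 2 = 0 := by omega
      have hpm : PySem.Int.mod (k : Int) 2 = 0 := by rw [hmod, h2]; simp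
      have hmid : pvMid gap w arm_len (k + 1) = pvMid gap w arm_len k ++
          [((arm_len : Int), ((k : Int) + 1) * (gap + w)), (0, ((k : Int) + 1) * (gap + w))] := by
        simp only [pvMid, List.range_succ]
        simp [hk2]
      rw [hmid]
      simp only [h2, h2', hpm, Prod.mk.injEq]
      norm_num
      ring
    · have h2 : k % 2 = 1 := Nat.odd_iff.mp ho
      have h2' : (k + 1) % 2 = 0 := by omega
      have hk2 : (k : Int) % 2 = 1 := by omega
      have hpm : PySem.Int.mod (k : Int) 2 = 1 := by rw [hmod, h2]; simp
      have hmid : pvMid gap w arm_len (k + 1) = pvMid gap w arm_len k ++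
          [((0 : Int), ((k : Int) + 1) * (gap + w)), (arm_len, ((k : Int) + 1) * (gap + w))] := by
        simp only [pvMid, List.range_succ]
        simp [hk2]
      rw [hmid]
      simp only [h2, h2', hpm, Prod.mk.injEq]
      norm_num
      ring

theorem pvLast3 (xs : List (Int × Int)) (a b c : Int × Int) :
    PySem.List.pyGetD (xs ++ [a, b, c]) (-1) (0, 0) = c := by
  have h : xs ++ [a, b, c] = (xs ++ [a, b]) ++ [c] := by simp
  rw [h, PySem.List.pyGetD_neg_one_append_singleton]

-- ===== VERDICT (by name: the statement is the Claim_ definition above) =====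
theorem get_resonator_path_spec : Claim_equal_get_resonator_path := by
  intro w N gap arm_len end_len _
  show get_resonator_path w N gap arm_len end_len = get_resonator_path_alt w N gap arm_len end_len
  have hr : PySem.List.pyRange 0 (N - 1) 1 = PySem.List.pyRange 0 (((N - 1).toNat : Int)) 1 := by
    by_cases h : 0 ≤ N - 1
    · rw [Int.toNat_of_nonneg h]
    · rw [PySem.List.pyRange_one_eq_nil (by omega), PySem.List.pyRange_one_eq_nil (by omega)]
  have hinit : PySem.List.pyGetD
      [(-3 - gap - w, end_len - 3), (-gap - w, end_len - 3), (-gap - w, 0), (0, 0), (arm_len, 0)]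
      (-1) ((0 : Int), (0 : Int)) = (arm_len, 0) := by
    exact PySem.List.pyGetD_neg_one_append_singleton
      [(-3 - gap - w, end_len - 3), (-gap - w, end_len - 3), (-gap - w, 0), (0, 0)] (arm_len, 0) (0, 0)
  have hloop := pvLoop_inv w gap arm_len
      [(-3 - gap - w, end_len - 3), (-gap - w, end_len - 3), (-gap - w, 0), (0, 0)] ((N - 1).toNat)
  simp only [get_resonator_path, get_resonator_path_alt]
  rw [hinit, hr]
  rw [show [(-3 - gap - w, end_len - 3), (-gap - w, end_len - 3), (-gap - w, 0), (0, 0), (arm_len, 0)]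
        = [(-3 - gap - w, end_len - 3), (-gap - w, end_len - 3), (-gap - w, 0), ((0 : Int), (0 : Int))] ++ [(arm_len, 0)] from rfl]
  rw [hloop, pvLast3]
  simp only [pvMid, pvLp, List.cons_append, List.nil_append, PySem.List.pyGetD_zero_cons, Prod.mk.injEq]
  have hy : (((N - 1).toNat : Int)) = max (N - 1) 0 := Int.toNat_eq_max (N - 1)
  rw [hy]
  norm_num
  constructor
  · ring
  · ring
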